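-- pv_equiv track=rewrite | github.com/ivanmarinoff/steganography_converter | steganography/audio_steg/text_encrypt.py | text_decrypt
-- ===== SOURCE A (Python) =====
-- def text_decrypt(encrypted_text):
--     decrypted_text = ""
--     whitespacecount = 0
--     for i in encrypted_text:
--         if i == '\t':
--             decrypted_text += chr(whitespacecount + 31)
--             whitespacecount = 0
--         elif i.isspace():
--             whitespacecount += 1
--         elif i.isalpha():
--             decrypted_text += i
--             whitespacecount = 0
--     return decrypted_text
-- ===== SOURCE B (Python) =====
-- def text_decrypt(encrypted_text):
--     # Phase 1: split the text into tab-separated segments.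
--     segments = []
--     cur = []
--     for c in encrypted_text:
--         if c == '\t':
--             segments.append(cur)
--             cur = []
--         else:
--             cur.append(c)
--     segments.append(cur)
--     # Phase 2: decode each segment independently: its letters, then (for every
--     # segment that was terminated by a tab, i.e. all but the last) one character
--     # encoding the number of whitespace characters after the segment's last letter.
--     pieces = []
--     last = len(segments) - 1
--     for k, seg in enumerate(segments):
--         pieces.append(''.join(c for c in seg if c.isalpha()))
--         if k != last:
--             tail = []
--             for c in reversed(seg):
--                 if c.isalpha():
--                     break
--                 tail.append(c)
--             pieces.append(chr(31 + sum(1 for c in tail if c.isspace())))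
--     return ''.join(pieces)
-- ===== Notes on version B (the rewrite author's own statement) =====
-- stated objective: alternative
-- what changed: A's single pass with a running whitespace counter reset on letters/tabs is replaced by a two-phase decomposition: split the text into tab-separated segments, then decode each segment independently as its letters plus one separator char computed by filtering letters and counting whitespace in the segment's non-letter suffix (scanned from the right).
import Mathlib
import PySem

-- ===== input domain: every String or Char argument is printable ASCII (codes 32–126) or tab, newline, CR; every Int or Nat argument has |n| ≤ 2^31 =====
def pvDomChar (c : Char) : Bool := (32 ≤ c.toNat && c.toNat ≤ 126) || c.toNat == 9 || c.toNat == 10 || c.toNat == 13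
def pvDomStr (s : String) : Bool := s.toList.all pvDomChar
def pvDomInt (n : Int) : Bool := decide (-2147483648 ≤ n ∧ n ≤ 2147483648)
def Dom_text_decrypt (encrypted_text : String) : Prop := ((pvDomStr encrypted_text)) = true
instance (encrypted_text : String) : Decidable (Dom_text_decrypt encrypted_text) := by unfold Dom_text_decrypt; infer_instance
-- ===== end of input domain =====

-- B replaces A's one-pass running-whitespace state machine by a two-phase decomposition
-- (split into tab-separated segments, then decode each segment by filtering its letters
-- and counting whitespace in its non-letter suffix); objective: alternative, same cost.

-- ===== PORT A =====
-- state: (decrypted_text as a char list, whitespacecount)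
def pvStepA (st : List Char × Nat) (c : Char) : List Char × Nat :=
  if c == '\t' then (st.1 ++ [Char.ofNat (st.2 + 31)], 0)
  else if PySem.Chars.isspace c then (st.1, st.2 + 1)
  else if PySem.Chars.isalpha c then (st.1 ++ [c], 0)
  else st

def text_decrypt (encrypted_text : String) : String :=
  String.mk (encrypted_text.toList.foldl pvStepA ([], 0)).1

-- ===== PORT B =====
-- phase 1 of Source B: the for-loop building (segments, cur)
def pvSplitStep (st : List (List Char) × List Char) (c : Char) : List (List Char) × List Char :=
  if c == '\t' then (st.1 ++ [st.2], []) else (st.1, st.2 ++ [c])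

def pvSegments (cs : List Char) : List (List Char) :=
  let st := cs.foldl pvSplitStep ([], [])
  st.1 ++ [st.2]

-- the for/break loop over reversed(seg): the maximal non-letter suffix (reversed)
def pvTailB (seg : List Char) : List Char :=
  seg.reverse.takeWhile (fun c => !PySem.Chars.isalpha c)

-- chr(31 + sum(1 for c in tail if c.isspace()))
def pvSepChar (seg : List Char) : Char :=
  Char.ofNat (31 + (pvTailB seg).countP (fun c => PySem.Chars.isspace c))

-- phase 2 of Source B: letters of every segment, a separator char after each non-final one
def pvDecode : List (List Char) → List Char
  | [] => []
  | [seg] => seg.filter PySem.Chars.isalpha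
  | seg :: rest => seg.filter PySem.Chars.isalpha ++ pvSepChar seg :: pvDecode rest

def text_decrypt_alt (encrypted_text : String) : String :=
  String.mk (pvDecode (pvSegments encrypted_text.toList))

-- ===== PRECONDITION & SPEC =====
def Spec_text_decrypt (encrypted_text : String) (out : String) : Prop := out = text_decrypt_alt encrypted_text
instance (encrypted_text : String) (out : String) : Decidable (Spec_text_decrypt encrypted_text out) := by unfold Spec_text_decrypt; infer_instance

-- ===== CLAIM (what is proved, stated in full; the proofs are below) =====
def Claim_equal_text_decrypt : Prop := ∀ (encrypted_text : String), Dom_text_decrypt encrypted_text → Spec_text_decrypt encrypted_text (text_decrypt encrypted_text)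

-- ===== LEMMAS AND PROOFS =====

-- A's whitespacecount at the end of a tab-free run, started at ws
def pvWsEnd : List Char → Nat → Nat
  | [], ws => ws
  | c :: t, ws =>
    if PySem.Chars.isspace c then pvWsEnd t (ws + 1)
    else if PySem.Chars.isalpha c then pvWsEnd t 0
    else pvWsEnd t ws

-- countP isspace of the maximal non-letter prefix
def pvH : List Char → Nat
  | [] => 0
  | c :: t => if PySem.Chars.isalpha c then 0
              else (if PySem.Chars.isspace c then 1 else 0) + pvH t

-- decoded output of a segment list, the FIRST separator computed from start count ws
def pvDecW (ws : Nat) : List (List Char) → List Char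
  | [] => []
  | [s] => s.filter PySem.Chars.isalpha
  | s :: rest => s.filter PySem.Chars.isalpha ++ Char.ofNat (31 + pvWsEnd s ws) :: pvDecW 0 rest

-- the split, defined by structural recursion from the front
def pvSegsF : List Char → List (List Char)
  | [] => [[]]
  | c :: t =>
    if c == '\t' then [] :: pvSegsF t
    else match pvSegsF t with
      | [] => [[c]]
      | s :: rest => (c :: s) :: rest

theorem pv_alpha_not_space (c : Char) (h : PySem.Chars.isalpha c = true) :
    PySem.Chars.isspace c = false := by
  have hA : ('A').val.toNat = 65 := rfl
  have hZ : ('Z').val.toNat = 90 := rfl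
  have ha : ('a').val.toNat = 97 := rfl
  have hz : ('z').val.toNat = 122 := rfl
  simp only [PySem.Chars.isalpha, PySem.Chars.isupper, PySem.Chars.islower, Char.le_def,
    UInt32.le_iff_toNat_le, hA, hZ, ha, hz, Bool.or_eq_true, Bool.and_eq_true,
    decide_eq_true_eq] at h
  simp only [PySem.Chars.isspace, Char.toNat, Bool.or_eq_false_iff, Bool.and_eq_false_iff,
    decide_eq_false_iff_not]
  omega

theorem pvSegsF_ne_nil (cs : List Char) : pvSegsF cs ≠ [] := by
  cases cs with
  | nil => simp [pvSegsF]
  | cons c t =>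
    simp only [pvSegsF]
    split
    · simp
    · cases h : pvSegsF t <;> simp

theorem pv_split_fold (cs : List Char) : ∀ segs cur,
    (cs.foldl pvSplitStep (segs, cur)).1 ++ [(cs.foldl pvSplitStep (segs, cur)).2]
      = segs ++ (match pvSegsF cs with
                 | [] => [cur]
                 | s :: rest => (cur ++ s) :: rest) := by
  induction cs with
  | nil => intro segs cur; simp [pvSegsF]
  | cons c t ih =>
    intro segs cur
    by_cases hc : c = '\t'
    · subst hc
      simp only [List.foldl_cons, pvSplitStep, beq_self_eq_true, if_true, pvSegsF]
      rw [ih]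
      cases h : pvSegsF t with
      | nil => exact absurd h (pvSegsF_ne_nil t)
      | cons s rest => simp
    · have hb : (c == '\t') = false := by simp [hc]
      simp only [List.foldl_cons, pvSplitStep, hb, Bool.false_eq_true, if_false, pvSegsF]
      rw [ih]
      cases h : pvSegsF t with
      | nil => exact absurd h (pvSegsF_ne_nil t)
      | cons s rest => simp

theorem pvSegments_eq (cs : List Char) : pvSegments cs = pvSegsF cs := by
  unfold pvSegments
  have := pv_split_fold cs [] []
  simp only [List.nil_append] at this
  rw [this]
  cases h : pvSegsF cs with
  | nil => exact absurd h (pvSegsF_ne_nil cs)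
  | cons s rest => simp

theorem pvH_all (rs : List Char) (h : ∀ c ∈ rs, PySem.Chars.isalpha c = false) :
    pvH rs = rs.countP (fun c => PySem.Chars.isspace c) := by
  induction rs with
  | nil => simp [pvH]
  | cons c t ih =>
    have hc := h c (by simp)
    simp only [pvH, hc, Bool.false_eq_true, if_false, List.countP_cons,
      ih (fun x hx => h x (by simp [hx]))]
    split <;> omega

theorem pvH_append_any (rs xs : List Char) (h : rs.any PySem.Chars.isalpha = true) :
    pvH (rs ++ xs) = pvH rs := by
  induction rs with
  | nil => simp at h
  | cons c t ih =>
    simp only [List.cons_append, pvH]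
    by_cases hc : PySem.Chars.isalpha c = true
    · simp [hc]
    · have hc' : PySem.Chars.isalpha c = false := by simpa using hc
      simp only [List.any_cons, hc', Bool.false_or] at h
      simp [hc', ih h]

theorem pvH_append_all (rs xs : List Char) (h : ∀ c ∈ rs, PySem.Chars.isalpha c = false) :
    pvH (rs ++ xs) = rs.countP (fun c => PySem.Chars.isspace c) + pvH xs := by
  induction rs with
  | nil => simp [pvH]
  | cons c t ih =>
    have hc := h c (by simp)
    simp only [List.cons_append, pvH, hc, Bool.false_eq_true, if_false, List.countP_cons,
      ih (fun x hx => h x (by simp [hx]))]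
    split <;> omega

theorem pvWsEnd_closed (s : List Char) : ∀ ws, pvWsEnd s ws =
    if s.any PySem.Chars.isalpha then pvH s.reverse
    else ws + s.countP (fun c => PySem.Chars.isspace c) := by
  induction s with
  | nil => intro ws; simp [pvWsEnd, pvH]
  | cons c t ih =>
    intro ws
    by_cases ha : PySem.Chars.isalpha c = true
    · have hs : PySem.Chars.isspace c = false := pv_alpha_not_space c ha
      simp only [pvWsEnd, hs, Bool.false_eq_true, if_false, ha, if_true, ih,
        List.any_cons, Bool.true_or, List.reverse_cons]
      by_cases hany : t.any PySem.Chars.isalpha = true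
      · rw [pvH_append_any t.reverse [c] (by simpa using hany)]
        simp [hany]
      · have hall : ∀ x ∈ t.reverse, PySem.Chars.isalpha x = false := by
          intro x hx
          rw [List.mem_reverse] at hx
          by_contra hc
          exact hany (List.any_eq_true.mpr ⟨x, hx, by simpa using hc⟩)
        rw [pvH_append_all t.reverse [c] hall]
        simp only [hany, Bool.false_eq_true, if_false, if_true, pvH, ha, if_true]
        simp [List.countP_reverse]
    · have ha' : PySem.Chars.isalpha c = false := by simpa using ha
      have hcnt : ∀ ws', (if t.any PySem.Chars.isalpha = true then pvH t.reverse
          else ws' + List.countP (fun c => PySem.Chars.isspace c) t)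
          = if (t.any PySem.Chars.isalpha) = true then pvH (t.reverse ++ [c])
            else ws' + List.countP (fun c => PySem.Chars.isspace c) t := by
        intro ws'
        by_cases hany : t.any PySem.Chars.isalpha = true
        · rw [pvH_append_any t.reverse [c] (by simpa using hany)]
        · simp [hany]
      by_cases hs : PySem.Chars.isspace c = true
      · simp only [pvWsEnd, hs, if_true, ih, List.any_cons, ha', Bool.false_or,
          List.reverse_cons, List.countP_cons, hs, hcnt]
        by_cases hany : t.any PySem.Chars.isalpha = true
        · simp [hany]
        · simp only [hany, Bool.false_eq_true, if_false]
          omega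
      · have hs' : PySem.Chars.isspace c = false := by simpa using hs
        simp only [pvWsEnd, hs', Bool.false_eq_true, if_false, ha', ih, List.any_cons,
          Bool.false_or, List.reverse_cons, List.countP_cons, hs', hcnt]
        by_cases hany : t.any PySem.Chars.isalpha = true
        · simp [hany]
        · simp only [hany, Bool.false_eq_true, if_false]
          simp [hs']

theorem pvWsEnd_zero (s : List Char) : pvWsEnd s 0 = pvH s.reverse := by
  rw [pvWsEnd_closed]
  by_cases hany : s.any PySem.Chars.isalpha = true
  · simp [hany]
  · have hall : ∀ x ∈ s.reverse, PySem.Chars.isalpha x = false := by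
      intro x hx
      rw [List.mem_reverse] at hx
      by_contra hc
      exact hany (List.any_eq_true.mpr ⟨x, hx, by simpa using hc⟩)
    simp [hany, pvH_all _ hall, List.countP_reverse]

theorem pvH_takeWhile (rs : List Char) :
    pvH rs = (rs.takeWhile (fun c => !PySem.Chars.isalpha c)).countP
      (fun c => PySem.Chars.isspace c) := by
  induction rs with
  | nil => simp [pvH]
  | cons c t ih =>
    by_cases ha : PySem.Chars.isalpha c = true
    · simp [pvH, ha, List.takeWhile_cons]
    · have ha' : PySem.Chars.isalpha c = false := by simpa using ha
      simp only [pvH, ha', Bool.false_eq_true, if_false, List.takeWhile_cons, Bool.not_false,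
        if_true, List.countP_cons, ih]
      split <;> omega

theorem pvSepChar_eq (s : List Char) : pvSepChar s = Char.ofNat (31 + pvWsEnd s 0) := by
  unfold pvSepChar pvTailB
  rw [pvWsEnd_zero, pvH_takeWhile]

theorem pvDecW_eq_decode (segs : List (List Char)) : pvDecW 0 segs = pvDecode segs := by
  induction segs with
  | nil => rfl
  | cons s rest ih =>
    cases rest with
    | nil => rfl
    | cons s2 r2 =>
      simp only [pvDecW, pvDecode, ih, pvSepChar_eq]

theorem pvA_main (cs : List Char) : ∀ ws (out : List Char),
    (cs.foldl pvStepA (out, ws)).1 = out ++ pvDecW ws (pvSegsF cs) := by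
  induction cs with
  | nil => intro ws out; simp [pvSegsF, pvDecW]
  | cons c t ih =>
    intro ws out
    by_cases hc : c = '\t'
    · subst hc
      simp only [List.foldl_cons, pvStepA, beq_self_eq_true, if_true]
      rw [ih]
      simp only [pvSegsF, beq_self_eq_true, if_true]
      cases h : pvSegsF t with
      | nil => exact absurd h (pvSegsF_ne_nil t)
      | cons s rest =>
        simp [pvDecW, pvWsEnd, Nat.add_comm]
    · have hb : (c == '\t') = false := by simp [hc]
      by_cases hs : PySem.Chars.isspace c = true
      · simp only [List.foldl_cons, pvStepA, hb, Bool.false_eq_true, if_false, hs, if_true]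
        rw [ih]
        simp only [pvSegsF, hb, Bool.false_eq_true, if_false]
        cases h : pvSegsF t with
        | nil => exact absurd h (pvSegsF_ne_nil t)
        | cons s rest =>
          have ha' : PySem.Chars.isalpha c = false := by
            cases hxx : PySem.Chars.isalpha c with
            | false => rfl
            | true => exact absurd hs (by simp [pv_alpha_not_space c hxx])
          cases rest with
          | nil => simp [pvDecW, List.filter_cons, ha']
          | cons s2 r2 =>
            simp [pvDecW, List.filter_cons, ha', pvWsEnd, hs]
      · have hs' : PySem.Chars.isspace c = false := by simpa using hs
        by_cases ha : PySem.Chars.isalpha c = true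
        · simp only [List.foldl_cons, pvStepA, hb, Bool.false_eq_true, if_false, hs',
            ha, if_true]
          rw [ih]
          simp only [pvSegsF, hb, Bool.false_eq_true, if_false]
          cases h : pvSegsF t with
          | nil => exact absurd h (pvSegsF_ne_nil t)
          | cons s rest =>
            cases rest with
            | nil => simp [pvDecW, List.filter_cons, ha]
            | cons s2 r2 =>
              simp [pvDecW, List.filter_cons, ha, pvWsEnd, hs']
        · have ha' : PySem.Chars.isalpha c = false := by simpa using ha
          simp only [List.foldl_cons, pvStepA, hb, Bool.false_eq_true, if_false, hs',
            ha', if_false]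
          rw [ih]
          simp only [pvSegsF, hb, Bool.false_eq_true, if_false]
          cases h : pvSegsF t with
          | nil => exact absurd h (pvSegsF_ne_nil t)
          | cons s rest =>
            cases rest with
            | nil => simp [pvDecW, List.filter_cons, ha']
            | cons s2 r2 =>
              simp [pvDecW, List.filter_cons, ha', pvWsEnd, hs']

-- ===== VERDICT (by name: the statement is the Claim_ definition above) =====
theorem text_decrypt_spec : Claim_equal_text_decrypt := by
  intro s _
  unfold Spec_text_decrypt text_decrypt text_decrypt_alt
  rw [pvA_main s.toList 0 [], pvSegments_eq, pvDecW_eq_decode]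
  simp
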